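-- pv_equiv track=rewrite | github.com/bitterbridge/rills | rills/main.py | generate_player_configs
-- ===== SOURCE A (Python) =====
-- def generate_player_configs(num_players: int) -> list[dict[str, str]]:
--     """Generate player configurations dynamically.
--
--     Args:
--     ----
--         num_players: Number of players (5-20)
--
--     Returns:
--     -------
--         List of player configuration dicts
--
--     """
--     # Extended pool of names
--     names = [
--         "Alice",
--         "Bob",
--         "Carol",
--         "David",
--         "Eve",
--         "Frank",
--         "Grace",
--         "Henry",
--         "Iris",
--         "Jack",
--         "Kate",
--         "Liam",
--         "Mia",
--         "Noah",
--         "Olivia",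
--         "Paul",
--         "Quinn",
--         "Ruby",
--         "Sam",
--         "Tina",
--     ]
--
--     # Pool of personalities
--     personalities = [
--         "Cunning and manipulative, pretends to be helpful",
--         "Aggressive and intimidating, tries to control the conversation",
--         "Cautious and analytical, tries to protect the innocent",
--         "Bold and direct, speaks their mind",
--         "Suspicious and paranoid, questions everything",
--         "Friendly and trusting, maybe too trusting",
--         "Logical and methodical, follows evidence",
--         "Nervous and anxious, easily flustered under pressure",
--         "Quiet and reserved, keeps to themselves",
--         "Charismatic and persuasive, natural leader",
--         "Sarcastic and witty, makes jokes to deflect",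
--         "Timid and hesitant, avoids confrontation",
--         "Observant and calculating, notices small details",
--         "Emotional and reactive, wears heart on sleeve",
--         "Strategic and patient, plays the long game",
--         "Impulsive and reckless, acts without thinking",
--         "Diplomatic and fair, seeks compromise",
--         "Mysterious and cryptic, speaks in riddles",
--         "Blunt and honest, no filter",
--         "Optimistic and cheerful, sees the best in everyone",
--     ]
--
--     # Role distribution: roughly 1/3 Assassins, rest divided among power roles and villagers
--     num_assassins = max(2, num_players // 3)
--     num_power_roles = min(
--         4,
--         num_players - num_assassins - 1,
--     )  # Doctor, Detective, Vigilante, Mad Scientist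
--     num_villagers = num_players - num_assassins - num_power_roles
--
--     roles = (
--         ["Assassins"] * num_assassins
--         + ["Doctor", "Detective", "Vigilante", "Mad Scientist"][:num_power_roles]
--         + ["Villager"] * num_villagers
--     )
--
--     return [
--         {"name": names[i], "role": roles[i], "personality": personalities[i % len(personalities)]}
--         for i in range(num_players)
--     ]
-- ===== SOURCE B (Python) =====
-- def generate_player_configs(num_players: int) -> list[dict[str, str]]:
--     """Generate player configurations by recursively consuming three parallel lists
--     (names, a role queue, a rotating personality queue) -- no index arithmetic."""
--     names = [
--         "Alice", "Bob", "Carol", "David", "Eve", "Frank", "Grace", "Henry",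
--         "Iris", "Jack", "Kate", "Liam", "Mia", "Noah", "Olivia", "Paul",
--         "Quinn", "Ruby", "Sam", "Tina",
--     ]
--     personalities = [
--         "Cunning and manipulative, pretends to be helpful",
--         "Aggressive and intimidating, tries to control the conversation",
--         "Cautious and analytical, tries to protect the innocent",
--         "Bold and direct, speaks their mind",
--         "Suspicious and paranoid, questions everything",
--         "Friendly and trusting, maybe too trusting",
--         "Logical and methodical, follows evidence",
--         "Nervous and anxious, easily flustered under pressure",
--         "Quiet and reserved, keeps to themselves",
--         "Charismatic and persuasive, natural leader",
--         "Sarcastic and witty, makes jokes to deflect",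
--         "Timid and hesitant, avoids confrontation",
--         "Observant and calculating, notices small details",
--         "Emotional and reactive, wears heart on sleeve",
--         "Strategic and patient, plays the long game",
--         "Impulsive and reckless, acts without thinking",
--         "Diplomatic and fair, seeks compromise",
--         "Mysterious and cryptic, speaks in riddles",
--         "Blunt and honest, no filter",
--         "Optimistic and cheerful, sees the best in everyone",
--     ]
--     num_assassins = max(2, num_players // 3)
--     num_power_roles = min(4, num_players - num_assassins - 1)
--     roles = (
--         ["Assassins"] * num_assassins
--         + ["Doctor", "Detective", "Vigilante", "Mad Scientist"][:num_power_roles]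
--         + ["Villager"] * (num_players - num_assassins - num_power_roles)
--     )
--
--     def build(k, ns, rs, ps):
--         if k <= 0:
--             return []
--         head = {"name": ns[0], "role": rs[0], "personality": ps[0]}
--         return [head] + build(k - 1, ns[1:], rs[1:], ps[1:] or personalities)
--
--     return build(num_players, names, roles, personalities)
-- ===== Notes on version B (the rewrite author's own statement) =====
-- stated objective: alternative
-- what changed: B builds the output by structural recursion that consumes three parallel queues (names, the role queue, a rotating personality queue) head-by-head, instead of A's single comprehension indexing names[i]/roles[i]/personalities[i % len] over range(num_players); no index arithmetic or modulo remains.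
-- outside the precondition, e.g. on generate_player_configs(21): A raises IndexError, B raises IndexError
import Mathlib
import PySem

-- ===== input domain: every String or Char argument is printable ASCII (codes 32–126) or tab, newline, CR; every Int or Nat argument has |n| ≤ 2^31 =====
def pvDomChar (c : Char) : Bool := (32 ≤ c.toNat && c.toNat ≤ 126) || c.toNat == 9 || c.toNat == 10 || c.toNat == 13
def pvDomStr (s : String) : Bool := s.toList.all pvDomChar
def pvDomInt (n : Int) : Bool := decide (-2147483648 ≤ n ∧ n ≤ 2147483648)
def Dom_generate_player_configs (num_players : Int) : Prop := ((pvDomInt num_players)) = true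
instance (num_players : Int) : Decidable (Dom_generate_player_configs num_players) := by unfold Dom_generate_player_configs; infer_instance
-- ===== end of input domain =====

-- B builds the result by structural recursion consuming three parallel queues (names,
-- role queue, rotating personality queue) instead of A's indexed comprehension. Objective: alternative.

-- shared literal pools (the same string constants appear verbatim in both Pythons)
def pvNames : List String := ["Alice", "Bob", "Carol", "David", "Eve", "Frank", "Grace", "Henry", "Iris", "Jack", "Kate", "Liam", "Mia", "Noah", "Olivia", "Paul", "Quinn", "Ruby", "Sam", "Tina"]

def pvPersonalities : List String := [
  "Cunning and manipulative, pretends to be helpful",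
  "Aggressive and intimidating, tries to control the conversation",
  "Cautious and analytical, tries to protect the innocent",
  "Bold and direct, speaks their mind",
  "Suspicious and paranoid, questions everything",
  "Friendly and trusting, maybe too trusting",
  "Logical and methodical, follows evidence",
  "Nervous and anxious, easily flustered under pressure",
  "Quiet and reserved, keeps to themselves",
  "Charismatic and persuasive, natural leader",
  "Sarcastic and witty, makes jokes to deflect",
  "Timid and hesitant, avoids confrontation",
  "Observant and calculating, notices small details",
  "Emotional and reactive, wears heart on sleeve",
  "Strategic and patient, plays the long game",
  "Impulsive and reckless, acts without thinking",
  "Diplomatic and fair, seeks compromise",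
  "Mysterious and cryptic, speaks in riddles",
  "Blunt and honest, no filter",
  "Optimistic and cheerful, sees the best in everyone"]

def pvPowerRoles : List String := ["Doctor", "Detective", "Vigilante", "Mad Scientist"]

-- ===== PORT A =====
-- literal transliteration of Source A: build the roles table, then index it per player.
-- names[i]/roles[i] are ported with pyGetD (Pre_ keeps i in range, so the default is never read).
def generate_player_configs (num_players : Int) : List (List (String × String)) :=
  let names := pvNames
  let personalities := pvPersonalities
  let num_assassins : Int := max 2 (PySem.Int.floordiv num_players 3)
  let num_power_roles : Int := min 4 (num_players - num_assassins - 1)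
  let num_villagers : Int := num_players - num_assassins - num_power_roles
  let roles : List String :=
    List.replicate num_assassins.toNat "Assassins"
      ++ PySem.List.slice pvPowerRoles none (some num_power_roles)
      ++ List.replicate num_villagers.toNat "Villager"
  (PySem.List.pyRange 0 num_players 1).map (fun i =>
    [("name", PySem.List.pyGetD names i ""),
     ("role", PySem.List.pyGetD roles i ""),
     ("personality", PySem.List.pyGetD personalities (PySem.Int.mod i (personalities.length : Int)) "")])

-- ===== PORT B =====
-- literal transliteration of Source B's recursive `build`: Python recurses on Int k with the
-- guard `if k <= 0: return []` and call build(k-1, …); that guarded Int countdown is ported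
-- as structural recursion on the Nat fuel k.toNat (exact: k ≤ 0 ↔ k.toNat = 0, and
-- (k-1).toNat = k.toNat - 1 for k > 0).  ns[0]/rs[0]/ps[0] are ported with pyGetD
-- (in range whenever Source B returns); `ps[1:] or personalities` is the empty-list test.
def pvBuild (k : Nat) (ns rs ps personalities : List String) : List (List (String × String)) :=
  match k with
  | 0 => []
  | Nat.succ m =>
    let head : List (String × String) :=
      [("name", PySem.List.pyGetD ns 0 ""),
       ("role", PySem.List.pyGetD rs 0 ""),
       ("personality", PySem.List.pyGetD ps 0 "")]
    let ps' := PySem.List.slice ps (some 1) none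
    [head] ++ pvBuild m (PySem.List.slice ns (some 1) none) (PySem.List.slice rs (some 1) none)
        (if ps'.isEmpty then personalities else ps') personalities

def generate_player_configs_alt (num_players : Int) : List (List (String × String)) :=
  let names := pvNames
  let personalities := pvPersonalities
  let num_assassins : Int := max 2 (PySem.Int.floordiv num_players 3)
  let num_power_roles : Int := min 4 (num_players - num_assassins - 1)
  let roles : List String :=
    List.replicate num_assassins.toNat "Assassins"
      ++ PySem.List.slice pvPowerRoles none (some num_power_roles)
      ++ List.replicate (num_players - num_assassins - num_power_roles).toNat "Villager"
  pvBuild num_players.toNat names roles personalities personalities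

-- ===== PRECONDITION & SPEC =====
-- Pre_ excludes num_players > 20, where Python A raises IndexError on names[i].
def Pre_generate_player_configs (num_players : Int) : Prop := num_players ≤ 20
instance (num_players : Int) : Decidable (Pre_generate_player_configs num_players) := by
  unfold Pre_generate_player_configs; infer_instance

def pvWitness_generate_player_configs : Int := 7

def Spec_generate_player_configs (num_players : Int) (out : List (List (String × String))) : Prop := out = generate_player_configs_alt num_players
instance (num_players : Int) (out : List (List (String × String))) : Decidable (Spec_generate_player_configs num_players out) := by unfold Spec_generate_player_configs; infer_instance

-- ===== CLAIM (what is proved, stated in full; the proofs are below) =====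
def Claim_equal_generate_player_configs : Prop := ∀ (num_players : Int), Dom_generate_player_configs num_players → Pre_generate_player_configs num_players → Spec_generate_player_configs num_players (generate_player_configs num_players)

-- ===== LEMMAS AND PROOFS =====

-- for non-positive player counts the range is empty, the fuel is 0, and both ports return []
lemma pv_nonpos (n : Int) (h : n ≤ 0) :
    generate_player_configs n = generate_player_configs_alt n := by
  have h0 : n.toNat = 0 := Int.toNat_of_nonpos h
  simp [generate_player_configs, generate_player_configs_alt,
        PySem.List.pyRange_one_eq_nil h, h0, pvBuild]

-- ===== VERDICT (by name: the statement is the Claim_ definition above) =====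
theorem generate_player_configs_spec : Claim_equal_generate_player_configs := by
  intro n _ hPre
  unfold Spec_generate_player_configs
  by_cases h : n ≤ 0
  · exact pv_nonpos n h
  · unfold Pre_generate_player_configs at hPre
    have h1 : 1 ≤ n := by omega
    interval_cases n <;> decide
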